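-- pv_equiv track=rewrite | github.com/DiscOH/DailyCodingChallenges | DawnoftheFirstDay/yuhan.py | to_win
-- ===== SOURCE A (Python) =====
-- def to_win(lst):
--     if len(lst) == 1:
--         return []
--     if len(lst) == 2:
--         if lst[0] > 1:
--             return [0]
--         else:
--             return []
--     else:
--         if lst[0] == 0:
--             return []
--         if lst[0] > len(lst):
--             return [0]
--         else:
--             result = []
--             for i in range(1, lst[0]+1):
--                 winnable = to_win(lst[i:])
--                 if winnable != []:
--                     result = [0] + [x+i for x in winnable]
--                     break
--             return result
-- ===== SOURCE B (Python) =====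
-- def to_win(lst):
--     n = len(lst)
--     # jump[j]: the relative jump taken from position j on the winning path of
--     # the suffix lst[j:], or None if that suffix is not winnable.
--     jump = [None] * n
--     for j in range(n - 1, -1, -1):
--         m = n - j
--         v = lst[j]
--         if m == 1:
--             continue
--         if m == 2:
--             if v > 1:
--                 jump[j] = 2
--         elif v > m:
--             jump[j] = v
--         elif v > 0:
--             for i in range(1, v + 1):
--                 if j + i < n and jump[j + i] is not None:
--                     jump[j] = i
--                     break
--     path = []
--     j = 0
--     while j < n and jump[j] is not None:
--         path.append(j)
--         j += jump[j]
--     return path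
-- ===== Notes on version B (the rewrite author's own statement) =====
-- stated objective: alternative
-- what changed: replaces the top-down recursion over list suffixes by a bottom-up table of smallest winning jumps per start index plus an iterative path reconstruction
import Mathlib
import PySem

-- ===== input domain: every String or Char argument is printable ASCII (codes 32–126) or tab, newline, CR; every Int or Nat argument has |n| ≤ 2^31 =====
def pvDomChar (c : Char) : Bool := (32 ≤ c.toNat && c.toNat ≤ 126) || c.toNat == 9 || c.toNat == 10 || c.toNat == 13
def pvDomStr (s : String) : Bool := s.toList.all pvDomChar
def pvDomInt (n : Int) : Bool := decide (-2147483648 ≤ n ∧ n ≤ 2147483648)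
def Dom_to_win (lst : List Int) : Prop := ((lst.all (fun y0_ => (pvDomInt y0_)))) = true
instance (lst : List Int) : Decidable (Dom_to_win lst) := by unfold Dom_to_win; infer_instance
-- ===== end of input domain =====

-- B replaces A's top-down recursion over suffixes by a bottom-up table of smallest
-- winning jumps plus an iterative path reconstruction (objective: alternative).

-- ===== PORT A =====
-- A's `for i in range(1, lst[0]+1): … break` is `to_winLoop a xs j` with i = j+1 and
-- xs the tail of lst (so lst[i:] = xs.drop j).  Wherever Python A raises IndexError
-- (it reads lst[0] of an empty suffix) the port returns []; exactly those inputs are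
-- excluded by Pre_to_win below.
mutual
def to_win (lst : List Int) : List Int :=
  match lst with
  | [] => []                                 -- Python: IndexError (outside Pre_)
  | [_] => []
  | [a, _] => if 1 < a then [0] else []
  | a :: b :: c :: rest =>
    if a = 0 then []
    else if ((a :: b :: c :: rest).length : Int) < a then [0]
    else to_winLoop a (b :: c :: rest) 0
  termination_by (lst.length, 1, 0)

def to_winLoop (a : Int) (xs : List Int) (j : Nat) : List Int :=
  if ((j : Int) + 1) ≤ a then
    let w := to_win (xs.drop j)
    if w ≠ [] then 0 :: w.map (· + ((j : Int) + 1)) else to_winLoop a xs (j + 1)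
  else []
  termination_by (xs.length + 1, 0, a.toNat + 1 - j)
end

-- ===== PORT B =====
-- Source B's inner `for i in range(1, v+1): if j+i<n and jump[j+i] is not None` scanning
-- the already-computed later entries t; running out of t ≡ j+i ≥ n for the rest.
def findJump (x : Int) (t : List (Option Int)) (i : Int) : Option Int :=
  match t with
  | [] => none
  | e :: rest =>
    if x < i then none
    else match e with
      | some _ => some i
      | none => findJump x rest (i + 1)

-- Source B's backward loop filling jump[j] from later entries = structural recursion.
def jumps : List Int → List (Option Int)
  | [] => []
  | v :: xs =>
    let t := jumps xs
    let m := xs.length + 1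
    (if m = 1 then none
     else if m = 2 then (if 1 < v then some 2 else none)
     else if (m : Int) < v then some v
     else if 0 < v then findJump v t 1
     else none) :: t

-- Source B's `while j < n and jump[j] is not None` (getD out of range = none covers j ≥ n);
-- fuel n+1 is enough: every stored jump is ≥ 1, so the walk takes at most n steps.
def walk (t : List (Option Int)) (j : Int) : Nat → List Int
  | 0 => []
  | f + 1 =>
    match t.getD j.toNat none with
    | some d => j :: walk t (j + d) f
    | none => []

def to_win_alt (lst : List Int) : List Int :=
  walk (jumps lst) 0 (lst.length + 1)

-- ===== PRECONDITION & SPEC =====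
-- Win/lose/crash label of every suffix of the input, right to left: a length-1 suffix
-- is lost (0); a length-2 suffix is won (1) iff its head v > 1; otherwise v = 0 is lost,
-- v > length is won, and else the label is the first non-lost label among the v next
-- shorter suffixes (the empty suffix carries 2, 'crash': A reads lst[0] of it and raises).
def suffixStatuses (lst : List Int) : List Nat :=
  lst.foldr
    (fun v t =>
      (if t.length = 1 then 0
       else if t.length = 2 then (if 1 < v then 1 else 0)
       else if v = 0 then 0
       else if (t.length : Int) < v then 1
       else ((t.take v.toNat).find? (fun st => st != 0)).getD 0) :: t)
    [2]

-- Pre_to_win admits exactly the inputs on which Python A returns: A raises IndexError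
-- precisely when the label of the whole list is 2 (its scan reaches the empty suffix —
-- the empty list, or a reached suffix whose head equals its length with no earlier
-- winnable suffix), so no input on which A returns a value is excluded.
def Pre_to_win (lst : List Int) : Prop :=
  (suffixStatuses lst).headD 2 ≠ 2
instance (lst : List Int) : Decidable (Pre_to_win lst) := by unfold Pre_to_win; infer_instance

def pvWitness_to_win : List Int := [4, 5, 2, 0, 1]

def Spec_to_win (lst : List Int) (out : List Int) : Prop := out = to_win_alt lst
instance (lst : List Int) (out : List Int) : Decidable (Spec_to_win lst out) := by
  unfold Spec_to_win; infer_instance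

-- ===== CLAIM (what is proved, stated in full; the proofs are below) =====
def Claim_equal_to_win : Prop :=
  ∀ (lst : List Int), Dom_to_win lst → Pre_to_win lst → Spec_to_win lst (to_win lst)

-- ===== LEMMAS AND PROOFS =====

theorem jumps_length (s : List Int) : (jumps s).length = s.length := by
  induction s with
  | nil => rfl
  | cons v xs ih => simp [jumps, ih]

theorem jumps_drop (k : Nat) (s : List Int) :
    jumps (s.drop k) = (jumps s).drop k := by
  induction k generalizing s with
  | zero => simp
  | succ k ih =>
    cases s with
    | nil => simp [jumps]
    | cons v xs => simpa [jumps] using ih xs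

theorem findJump_ge {x : Int} {t : List (Option Int)} {i r : Int}
    (h : findJump x t i = some r) : i ≤ r := by
  induction t generalizing i with
  | nil => simp [findJump] at h
  | cons e rest ih =>
    unfold findJump at h
    by_cases hxi : x < i
    · rw [if_pos hxi] at h; simp at h
    · rw [if_neg hxi] at h
      cases e with
      | some d => simp at h; omega
      | none => have := ih h; omega

theorem findJump_le {x : Int} {t : List (Option Int)} {i r : Int}
    (h : findJump x t i = some r) : r ≤ x ∧ r ≤ i + (t.length : Int) - 1 := by
  induction t generalizing i with
  | nil => simp [findJump] at h
  | cons e rest ih =>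
    unfold findJump at h
    by_cases hxi : x < i
    · rw [if_pos hxi] at h; simp at h
    · rw [if_neg hxi] at h
      cases e with
      | some d =>
        simp at h
        simp only [List.length_cons]
        constructor <;> omega
      | none =>
        have := ih h
        simp only [List.length_cons]
        constructor
        · exact this.1
        · have h2 := this.2
          push_cast at h2 ⊢
          omega

theorem jumps_pos {s : List Int} {d : Int} (h : some d ∈ jumps s) : 1 ≤ d := by
  induction s with
  | nil => simp [jumps] at h
  | cons v xs ih =>
    simp only [jumps, List.mem_cons] at h
    rcases h with h | h
    · split at h
      · simp at h
      · split at h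
        · split at h <;> simp_all
        · split at h
          · rename_i hm1 hm2 hma
            simp at h; omega
          · split at h
            · exact le_trans (by norm_num) (findJump_ge h.symm)
            · simp at h
    · exact ih h

theorem getD_some_mem {t : List (Option Int)} {n : Nat} {d : Int}
    (h : t.getD n none = some d) : some d ∈ t := by
  rcases ht : t[n]? with _ | e
  · simp [List.getD, ht] at h
  · have : e = some d := by simpa [List.getD, ht] using h
    subst this
    exact List.mem_of_getElem? ht

theorem getD_drop (t : List (Option Int)) (k j : Nat) :
    (t.drop k).getD j none = t.getD (k + j) none := by
  simp [List.getD, List.getElem?_drop]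

theorem walk_succ (t : List (Option Int)) (j : Int) (f : Nat) :
    walk t j (f + 1) = match t.getD j.toNat none with
      | some d => j :: walk t (j + d) f
      | none => [] := rfl

theorem walk_shift (f : Nat) (t : List (Option Int)) (k : Nat) (j : Int)
    (hj : 0 ≤ j) (hpos : ∀ d : Int, some d ∈ t → 0 ≤ d) :
    walk t (j + (k : Int)) f = (walk (t.drop k) j f).map (· + (k : Int)) := by
  induction f generalizing j with
  | zero => simp [walk]
  | succ f ih =>
    have hidx : (j + (k : Int)).toNat = k + j.toNat := by omega
    rw [walk_succ, walk_succ, hidx, getD_drop]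
    rcases he : t.getD (k + j.toNat) none with _ | d
    · simp
    · have hd : 0 ≤ d := hpos d (getD_some_mem he)
      simp only [List.map_cons]
      rw [show j + (k : Int) + d = (j + d) + (k : Int) by ring, ih (j + d) (by omega)]

theorem walk_fuel (f1 : Nat) (t : List (Option Int)) (j : Int) (f2 : Nat)
    (hj : 0 ≤ j) (hpos : ∀ d : Int, some d ∈ t → 1 ≤ d)
    (hf : t.length ≤ j.toNat + f1) (hle : f1 ≤ f2) :
    walk t j f1 = walk t j f2 := by
  induction f1 generalizing j f2 with
  | zero =>
    have hnone : t.getD j.toNat none = none := by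
      apply List.getD_eq_default
      omega
    cases f2 with
    | zero => rfl
    | succ f2 => rw [walk_succ, hnone]; rfl
  | succ f1 ih =>
    cases f2 with
    | zero => omega
    | succ f2 =>
      rw [walk_succ, walk_succ]
      rcases he : t.getD j.toNat none with _ | d
      · rfl
      · have hd : 1 ≤ d := hpos d (getD_some_mem he)
        have hlen : j.toNat < t.length := by
          by_contra hc
          rw [List.getD_eq_default _ _ (by omega)] at he
          simp at he
        show j :: walk t (j + d) f1 = j :: walk t (j + d) f2
        rw [ih (j + d) f2 (by omega) (by omega) (by omega)]

-- head entry of the table of s, as jumps s read at 0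
theorem to_win_alt_head (s : List Int) :
    to_win_alt s = match (jumps s).getD 0 none with
      | some d => 0 :: walk (jumps s) (0 + d) s.length
      | none => [] := by
  unfold to_win_alt
  rw [walk_succ]
  rfl

theorem to_win_alt_ne_nil (s : List Int) :
    to_win_alt s ≠ [] ↔ (jumps s).getD 0 none ≠ none := by
  rw [to_win_alt_head]
  rcases he : (jumps s).getD 0 none with _ | d <;> simp

theorem findJump_stop {x i : Int} (t : List (Option Int)) (h : x < i) :
    findJump x t i = none := by
  cases t with
  | nil => rfl
  | cons e rest => unfold findJump; rw [if_pos h]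

-- the inner loop of A against Source B's findJump over the already-built table
theorem loop_eq_findJump (a : Int) (xs : List Int) (j : Nat)
    (hIH : ∀ s' : List Int, s'.length < xs.length + 1 →
      to_win s' = to_win_alt s') :
    to_winLoop a xs j =
      match findJump a ((jumps xs).drop j) ((j : Int) + 1) with
      | none => []
      | some i => 0 :: (to_win (xs.drop (i.toNat - 1))).map (· + i) := by
  by_cases hja : ((j : Int) + 1) ≤ a
  · by_cases hjlt : j < xs.length
    · -- loop body runs on a real suffix
      have hl : j < (jumps xs).length := by rw [jumps_length]; exact hjlt
      have hdropc : (jumps xs).drop j =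
          (jumps xs).getD j none :: (jumps xs).drop (j + 1) := by
        rw [List.drop_eq_getElem_cons hl]
        simp [List.getD, List.getElem?_eq_getElem hl]
      have hlen : (xs.drop j).length < xs.length + 1 := by
        simp only [List.length_drop]; omega
      have hw : to_win (xs.drop j) = to_win_alt (xs.drop j) := hIH _ hlen
      have hhead : (jumps (xs.drop j)).getD 0 none = (jumps xs).getD j none := by
        rw [jumps_drop, getD_drop, Nat.add_zero]
      rw [to_winLoop, if_pos hja, hdropc]
      rcases he : (jumps xs).getD j none with _ | d
      · -- no win at j: loop continues, findJump skips the none entry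
        have hwnil : to_win (xs.drop j) = [] := by
          rw [hw]
          by_contra hc
          exact ((to_win_alt_ne_nil _).1 hc) (hhead.trans he)
        have hfj : findJump a (none :: (jumps xs).drop (j + 1)) ((j : Int) + 1)
            = findJump a ((jumps xs).drop (j + 1)) ((j : Int) + 1 + 1) := by
          conv_lhs => rw [findJump]
          rw [if_neg (by omega : ¬ a < (j : Int) + 1)]
        rw [hfj, show ((j : Int) + 1 + 1) = (((j + 1 : Nat)) : Int) + 1 by push_cast; ring]
        rw [← loop_eq_findJump a xs (j + 1) hIH]
        simp only [hwnil, ne_eq, not_true_eq_false, if_false]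
      · -- win at j: both sides pick i = j+1
        have hwne : to_win (xs.drop j) ≠ [] := by
          rw [hw]
          exact (to_win_alt_ne_nil _).2 (by rw [hhead, he]; simp)
        have hfj : findJump a (some d :: (jumps xs).drop (j + 1)) ((j : Int) + 1)
            = some ((j : Int) + 1) := by
          conv_lhs => rw [findJump]
          rw [if_neg (by omega : ¬ a < (j : Int) + 1)]
        rw [hfj]
        show (if to_win (xs.drop j) ≠ [] then
                0 :: (to_win (xs.drop j)).map (· + ((j : Int) + 1))
              else to_winLoop a xs (j + 1))
            = 0 :: (to_win (xs.drop ((((j : Int) + 1)).toNat - 1))).map (· + ((j : Int) + 1))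
        rw [if_pos hwne, show (((j : Int) + 1)).toNat - 1 = j by omega]
    · -- j past the end of xs: the suffix is empty, both sides give []
      have hdnil : xs.drop j = [] := List.drop_eq_nil_of_le (by omega)
      have hjnil : (jumps xs).drop j = [] :=
        List.drop_eq_nil_of_le (by rw [jumps_length]; omega)
      have hjnil' : (jumps xs).drop (j + 1) = [] :=
        List.drop_eq_nil_of_le (by rw [jumps_length]; omega)
      rw [to_winLoop, if_pos hja, hjnil]
      have hwnil : to_win (xs.drop j) = [] := by rw [hdnil, to_win]
      simp only [hwnil, ne_eq, not_true_eq_false, if_false]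
      rw [loop_eq_findJump a xs (j + 1) hIH, hjnil']
      rfl
  · -- range exhausted: both sides stop
    rw [to_winLoop, if_neg hja, findJump_stop _ (by omega : a < (j : Int) + 1)]
termination_by a.toNat + 1 - j
decreasing_by all_goals omega

-- unconditional equality of the two ports, by strong induction on the length
theorem main_eq (n : Nat) : ∀ s : List Int, s.length ≤ n →
    to_win s = to_win_alt s := by
  induction n with
  | zero =>
    intro s hs
    simp only [Nat.le_zero, List.length_eq_zero_iff] at hs
    subst hs
    rw [to_win]
    rfl
  | succ n ih =>
    intro s hs
    match s with
    | [] => rw [to_win]; rfl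
    | [x] =>
      rw [to_win]
      simp [to_win_alt, jumps, walk]
    | [x, y] =>
      rw [to_win]
      by_cases hx : 1 < x <;> simp [to_win_alt, jumps, walk, hx, List.getD]
    | a :: b :: c :: rest =>
      set xs : List Int := b :: c :: rest with hxs
      have hLen : (a :: xs).length = xs.length + 1 := rfl
      have hm1 : ¬ xs.length + 1 = 1 := by simp [hxs]
      have hm2 : ¬ xs.length + 1 = 2 := by simp [hxs]
      have halt := to_win_alt_head (a :: xs)
      rw [to_win]
      by_cases ha0 : a = 0
      · subst ha0
        have hent : (jumps ((0 : Int) :: xs)).getD 0 none = none := by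
          simp only [jumps, hm1, hm2, if_false, List.getD_cons_zero]
          rw [if_neg (by omega : ¬ ((xs.length + 1 : Nat) : Int) < 0),
              if_neg (by omega : ¬ (0 : Int) < 0)]
        rw [if_pos rfl, halt, hent]
      · rw [if_neg ha0]
        by_cases hbig : (((a :: xs).length : Nat) : Int) < a
        · have hbig' : ((xs.length + 1 : Nat) : Int) < a := by simpa using hbig
          have hent : (jumps (a :: xs)).getD 0 none = some a := by
            simp only [jumps, hm1, hm2, if_false, List.getD_cons_zero, if_pos hbig']
          rw [if_pos hbig, halt, hent]
          show [0] = 0 :: walk (jumps (a :: xs)) (0 + a) (xs.length + 1)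
          have hout : (jumps (a :: xs)).getD ((0 : Int) + a).toNat none = none := by
            apply List.getD_eq_default
            rw [jumps_length, hLen]
            omega
          rw [walk_succ, hout]
        · rw [if_neg hbig]
          have hbig' : ¬ ((xs.length + 1 : Nat) : Int) < a := by simpa using hbig
          by_cases hapos : 0 < a
          · have hIH' : ∀ s' : List Int, s'.length < xs.length + 1 →
                to_win s' = to_win_alt s' := by
              intro s' h1
              exact ih s' (by simp only [List.length_cons] at hs h1 ⊢; omega)
            have hent : (jumps (a :: xs)).getD 0 none = findJump a (jumps xs) 1 := by
              simp only [jumps, hm1, hm2, if_false, List.getD_cons_zero,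
                if_neg hbig', if_pos hapos]
            have hjc : jumps (a :: xs) = findJump a (jumps xs) 1 :: jumps xs := by
              simp only [jumps, hm1, hm2, if_false, if_neg hbig', if_pos hapos]
            rw [loop_eq_findJump a xs 0 hIH', halt, hent]
            simp only [List.drop_zero, Nat.cast_zero, zero_add]
            rcases hf : findJump a (jumps xs) 1 with _ | i
            · rfl
            · have hi1 : 1 ≤ i := by
                have := findJump_ge hf
                omega
              have hilen : i ≤ (xs.length : Int) := by
                have := (findJump_le hf).2
                rw [jumps_length] at this
                omega
              have hcast : ((i.toNat : Nat) : Int) = i := by omega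
              show 0 :: (to_win (xs.drop (i.toNat - 1))).map (· + i)
                  = 0 :: walk (jumps (a :: xs)) i (xs.length + 1)
              have hposfull : ∀ d : Int, some d ∈ jumps (a :: xs) → 0 ≤ d := by
                intro d hd
                have := jumps_pos hd
                omega
              have hshift := walk_shift (xs.length + 1) (jumps (a :: xs)) i.toNat 0
                le_rfl hposfull
              rw [hcast] at hshift
              rw [zero_add] at hshift
              rw [hshift]
              have hdropj : (jumps (a :: xs)).drop i.toNat
                  = jumps (xs.drop (i.toNat - 1)) := by
                rw [hjc]
                rcases hit : i.toNat with _ | t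
                · omega
                · rw [List.drop_succ_cons, Nat.succ_sub_one, jumps_drop]
              rw [hdropj]
              have hposs : ∀ d : Int, some d ∈ jumps (xs.drop (i.toNat - 1)) → 1 ≤ d :=
                fun d hd => jumps_pos hd
              have hfuel := walk_fuel ((xs.drop (i.toNat - 1)).length + 1)
                (jumps (xs.drop (i.toNat - 1))) 0 (xs.length + 1) le_rfl hposs
                (by rw [jumps_length]; omega)
                (by simp only [List.length_drop]; omega)
              rw [← hfuel]
              have hlt : (xs.drop (i.toNat - 1)).length < xs.length + 1 := by
                simp only [List.length_drop]
                omega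
              rw [hIH' _ hlt]
              rfl
          · -- a < 0: empty range, no entry
            rw [to_winLoop, if_neg (by omega : ¬ (((0 : Nat) : Int) + 1 ≤ a))]
            have hent : (jumps (a :: xs)).getD 0 none = none := by
              simp only [jumps, hm1, hm2, if_false, List.getD_cons_zero,
                if_neg hbig', if_neg hapos]
            rw [halt, hent]

-- ===== VERDICT (by name: the statement is the Claim_ definition above) =====
theorem to_win_spec : Claim_equal_to_win := by
  intro lst _hdom _hpre
  unfold Spec_to_win
  exact main_eq lst.length lst le_rfl
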